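-- pv_equiv track=rewrite | github.com/marianoOca/tesis | complexity_metrics.py | discrepancy
-- ===== SOURCE A (Python) =====
-- def Kadane_for_2blocks(seq:str, pos:str, neg:str) -> int:
--     res = 0
--     maxEnding = 0
--     pos_index = 0
--     neg_index = 0
--
--     for i in range(len(seq)-len(pos)+1):
--         if seq[i:i+len(pos)] == pos and i >= pos_index:
--             to_add = 1
--             pos_index = i + len(pos)
--         elif seq[i:i+len(pos)] == neg and i >= neg_index:
--             to_add = -1
--             neg_index = i + len(pos)
--         else:
--             to_add = 0
--         maxEnding = max(maxEnding + to_add, to_add)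
--
--         res = max(res, maxEnding)
--
--     return res
--
-- def discrepancy(seq:str, block_size:int = 1) -> int:
--     #alphabet = set("TGAC")                  #para ácidos nucléicos
--     alphabet = set("ACDEFGHIKLMNPQRSTVWY")   #para aminoácidos
--     working_alph = alphabet.copy()
--     res = 0
--
--     for _ in range(block_size-1):
--         working_alph = {i + j for i in working_alph for j in alphabet}
--
--     for i in working_alph:
--         remaining_alphabet = working_alph - {i}
--         for j in remaining_alphabet:
--             res = max(res, Kadane_for_2blocks(seq, i, j))
--
--     return res
-- ===== SOURCE B (Python) =====
-- # B: instead of enumerating all |alphabet|**block_size blocks, collect only the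
-- # blocks that actually occur in seq; any absent block behaves identically as the
-- # "negative" block, so one gated occurrence count replaces all those pairs.
--
-- _ALPH = "ACDEFGHIKLMNPQRSTVWY"
--
-- def _gated_count(seq: str, blk: str) -> int:
--     # number of greedily-chosen non-overlapping occurrences of blk in seq
--     L = len(blk)
--     cnt = 0
--     nxt = 0
--     for k in range(len(seq) - L + 1):
--         if seq[k:k+L] == blk and k >= nxt:
--             cnt += 1
--             nxt = k + L
--     return cnt
--
-- def _pair_score(seq: str, pos: str, neg: str) -> int:
--     # phase 1: the +1/-1/0 contribution of every position (greedy gating)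
--     L = len(pos)
--     vals = []
--     pi = 0
--     ni = 0
--     for k in range(len(seq) - L + 1):
--         w = seq[k:k+L]
--         if w == pos and k >= pi:
--             vals.append(1)
--             pi = k + L
--         elif w == neg and k >= ni:
--             vals.append(-1)
--             ni = k + L
--         else:
--             vals.append(0)
--     # phase 2: maximum (possibly empty) subarray sum of vals
--     best = 0
--     cur = 0
--     for v in vals:
--         cur = max(cur + v, v)
--         best = max(best, cur)
--     return best
--
-- def discrepancy(seq: str, block_size: int = 1) -> int:
--     L = block_size if block_size > 1 else 1
--     n = len(seq)
--     # distinct windows of length L made only of alphabet letters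
--     P = set()
--     for k in range(n - L + 1):
--         w = seq[k:k+L]
--         if all(c in _ALPH for c in w):
--             P.add(w)
--     # is some alphabet block of length L absent from seq?  (len(P) < 20**L,
--     # decided with an early exit so the power never gets large)
--     absent = False
--     c = 1
--     for _ in range(L):
--         c = c * 20
--         if c > len(P):
--             absent = True
--             break
--     res = 0
--     for i in P:
--         if absent:
--             res = max(res, _gated_count(seq, i))
--         for j in P:
--             if j != i:
--                 res = max(res, _pair_score(seq, i, j))
--     return res
-- ===== Notes on version B (the rewrite author's own statement) =====
-- stated objective: faster
-- what changed: B collects only the distinct alphabet blocks that actually occur as windows of seq and maximizes over those pairs (pair score computed as a two-phase tag-then-max-subarray scan); every pair whose second block is absent from seq collapses to one gated non-overlapping occurrence count per occurring block, instead of A's scan over all 20^block_size * (20^block_size - 1) ordered alphabet block pairs. Intended as faster; measured: A timed out at n=16 where B returned, and no clean ratio could be read at sizes where both finish.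
import Mathlib
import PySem

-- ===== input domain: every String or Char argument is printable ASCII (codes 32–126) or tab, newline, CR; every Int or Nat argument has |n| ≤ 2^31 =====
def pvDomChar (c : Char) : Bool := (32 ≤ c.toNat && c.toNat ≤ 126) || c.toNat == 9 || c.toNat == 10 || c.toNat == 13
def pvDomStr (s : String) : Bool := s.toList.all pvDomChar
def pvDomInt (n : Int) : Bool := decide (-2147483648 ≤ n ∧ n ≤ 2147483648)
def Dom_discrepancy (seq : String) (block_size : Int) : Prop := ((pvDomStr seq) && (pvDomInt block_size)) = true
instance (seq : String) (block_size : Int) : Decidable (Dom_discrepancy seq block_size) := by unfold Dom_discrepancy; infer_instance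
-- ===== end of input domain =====

-- B enumerates only the blocks that occur in seq (A enumerates all 20^block_size); absent blocks
-- are replaced by one gated occurrence count per block (objective: faster — intended as faster;
-- measured: A timed out at n=16 where B returned; no clean ratio at sizes where both finish).

-- ===== PORT A =====
def pvAlphChars : List Char := "ACDEFGHIKLMNPQRSTVWY".toList

def pvAlphabet : PySem.Set (List Char) := PySem.Set.ofList (pvAlphChars.map (fun c => [c]))

-- {i + j for i in working_alph for j in alphabet}
def pvWStep (w : PySem.Set (List Char)) : PySem.Set (List Char) :=
  PySem.Set.ofList (w.flatMap (fun i => pvAlphabet.map (fun j => i ++ j)))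

-- one iteration of A's scan: state (res, maxEnding, pos_index, neg_index)
def pvKadaneStep (cs pos neg : List Char) (st : Int × Int × Int × Int) (i : Int) :
    Int × Int × Int × Int :=
  let t : Int × Int × Int :=
    if PySem.List.slice cs (some i) (some (i + (pos.length : Int))) = pos ∧ st.2.2.1 ≤ i then
      (1, i + (pos.length : Int), st.2.2.2)
    else if PySem.List.slice cs (some i) (some (i + (pos.length : Int))) = neg ∧ st.2.2.2 ≤ i then
      (-1, st.2.2.1, i + (pos.length : Int))
    else (0, st.2.2.1, st.2.2.2)
  let me' := max (st.2.1 + t.1) t.1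
  (max st.1 me', me', t.2.1, t.2.2)

def Kadane_for_2blocks (cs pos neg : List Char) : Int :=
  ((PySem.List.pyRange 0 ((cs.length : Int) - (pos.length : Int) + 1) 1).foldl
    (pvKadaneStep cs pos neg) (0, 0, 0, 0)).1

def discrepancy (seq : String) (block_size : Int) : Int :=
  let working_alph :=
    (PySem.List.pyRange 0 (block_size - 1) 1).foldl (fun w _ => pvWStep w) pvAlphabet
  working_alph.foldl (fun res i =>
    (PySem.Set.diff working_alph (PySem.Set.ofList [i])).foldl
      (fun r j => max r (Kadane_for_2blocks seq.toList i j)) res) 0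

-- ===== PORT B =====
-- number of greedily chosen non-overlapping occurrences of blk in cs
def pvGatedCount (cs blk : List Char) : Int :=
  ((PySem.List.pyRange 0 ((cs.length : Int) - (blk.length : Int) + 1) 1).foldl
    (fun (st : Int × Int) k =>
      if PySem.List.slice cs (some k) (some (k + (blk.length : Int))) = blk ∧ st.2 ≤ k then
        (st.1 + 1, k + (blk.length : Int))
      else st) (0, 0)).1

-- phase 1 of _pair_score: build the +1/-1/0 contribution list; state (vals, pi, ni)
def pvTagStep (cs pos neg : List Char) (st : List Int × Int × Int) (k : Int) :
    List Int × Int × Int :=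
  if PySem.List.slice cs (some k) (some (k + (pos.length : Int))) = pos ∧ st.2.1 ≤ k then
    (st.1 ++ [1], k + (pos.length : Int), st.2.2)
  else if PySem.List.slice cs (some k) (some (k + (pos.length : Int))) = neg ∧ st.2.2 ≤ k then
    (st.1 ++ [-1], st.2.1, k + (pos.length : Int))
  else (st.1 ++ [0], st.2.1, st.2.2)

-- phase 2 of _pair_score: max (possibly empty) subarray sum; state (best, cur)
def pvKad2Step (bc : Int × Int) (v : Int) : Int × Int :=
  (max bc.1 (max (bc.2 + v) v), max (bc.2 + v) v)

def pvPairScore (cs pos neg : List Char) : Int :=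
  let vals := ((PySem.List.pyRange 0 ((cs.length : Int) - (pos.length : Int) + 1) 1).foldl
    (pvTagStep cs pos neg) ([], 0, 0)).1
  (vals.foldl pvKad2Step (0, 0)).1

-- the early-exit 20**L vs len(P) loop ('break' = true)
def pvAbsentLoop : Nat → Int → Int → Bool
  | 0, _, _ => false
  | m + 1, c, p => if c * 20 > p then true else pvAbsentLoop m (c * 20) p

-- the set P of distinct in-alphabet windows of length L
def pvWindows (cs : List Char) (L : Int) : PySem.Set (List Char) :=
  (PySem.List.pyRange 0 ((cs.length : Int) - L + 1) 1).foldl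
    (fun s k =>
      let w := PySem.List.slice cs (some k) (some (k + L))
      if w.all (fun c => pvAlphChars.contains c) then PySem.Set.add s w else s)
    PySem.Set.empty

def discrepancy_alt (seq : String) (block_size : Int) : Int :=
  let cs := seq.toList
  let L : Int := if 1 < block_size then block_size else 1
  let P := pvWindows cs L
  let absent := pvAbsentLoop L.toNat 1 (P.length : Int)
  P.foldl (fun res i =>
    P.foldl (fun r j => if j ≠ i then max r (pvPairScore cs i j) else r)
      (if absent then max res (pvGatedCount cs i) else res)) 0

-- ===== PRECONDITION & SPEC =====
def Spec_discrepancy (seq : String) (block_size : Int) (out : Int) : Prop := out = discrepancy_alt seq block_size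
instance (seq : String) (block_size : Int) (out : Int) : Decidable (Spec_discrepancy seq block_size out) := by unfold Spec_discrepancy; infer_instance

-- ===== CLAIM (what is proved, stated in full; the proofs are below) =====
def Claim_equal_discrepancy : Prop := ∀ (seq : String) (block_size : Int), Dom_discrepancy seq block_size → Spec_discrepancy seq block_size (discrepancy seq block_size)

-- ===== LEMMAS AND PROOFS =====

-- A's working alphabet after m iterations
def pvWA (m : Nat) : PySem.Set (List Char) := pvWStep^[m] pvAlphabet

theorem pv_WA_succ (m : Nat) : pvWA (m + 1) = pvWStep (pvWA m) :=
  Function.iterate_succ_apply' pvWStep m pvAlphabet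

theorem pv_foldl_const_iterate (l : List Int) (s : PySem.Set (List Char)) :
    l.foldl (fun w _ => pvWStep w) s = pvWStep^[l.length] s := by
  induction l generalizing s with
  | nil => rfl
  | cons x t ih => simp [List.foldl_cons, ih, Function.iterate_succ_apply]

theorem pv_alpha_mem_iff (w : List Char) :
    w ∈ pvAlphabet ↔ w.length = 1 ∧ ∀ c ∈ w, c ∈ pvAlphChars := by
  constructor
  · intro hw
    have hall : pvAlphabet.all
        (fun w => w.length == 1 && w.all (fun c => pvAlphChars.contains c)) = true := by decide
    have := List.all_eq_true.1 hall w hw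
    simp only [Bool.and_eq_true, beq_iff_eq, List.all_eq_true, List.contains_iff_mem] at this
    exact ⟨this.1, this.2⟩
  · rintro ⟨hl, hc⟩
    match w, hl with
    | [c], _ =>
      have hm : c ∈ pvAlphChars := hc c (by simp)
      have hall : pvAlphChars.all (fun c => pvAlphabet.contains [c]) = true := by decide
      have := List.all_eq_true.1 hall c hm
      simpa using this

theorem pv_WA_mem_iff (m : Nat) (w : List Char) :
    w ∈ pvWA m ↔ w.length = m + 1 ∧ ∀ c ∈ w, c ∈ pvAlphChars := by
  induction m generalizing w with
  | zero => exact pv_alpha_mem_iff w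
  | succ m ih =>
    rw [pv_WA_succ, pvWStep, PySem.Set.mem_ofList, List.mem_flatMap]
    constructor
    · rintro ⟨i, hi, hmem⟩
      rw [List.mem_map] at hmem
      obtain ⟨j, hj, rfl⟩ := hmem
      obtain ⟨hil, hic⟩ := (ih i).1 hi
      obtain ⟨hjl, hjc⟩ := (pv_alpha_mem_iff j).1 hj
      refine ⟨by simp [hil, hjl], ?_⟩
      intro c hc
      rcases List.mem_append.1 hc with h | h
      exacts [hic c h, hjc c h]
    · rintro ⟨hl, hc⟩
      refine ⟨w.take (m + 1), (ih _).2 ⟨?_, ?_⟩, ?_⟩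
      · rw [List.length_take]; omega
      · intro c hcm; exact hc c (List.mem_of_mem_take hcm)
      · rw [List.mem_map]
        refine ⟨w.drop (m + 1), (pv_alpha_mem_iff _).2 ⟨?_, ?_⟩, ?_⟩
        · rw [List.length_drop]; omega
        · intro c hcm; exact hc c (List.mem_of_mem_drop hcm)
        · exact List.take_append_drop _ _

theorem pv_WA_nodup_length (m : Nat) :
    (pvWA m).Nodup ∧ (pvWA m).length = 20 ^ (m + 1) := by
  induction m with
  | zero => exact ⟨by decide, by decide⟩
  | succ m ih =>
    have halpha : (pvAlphabet).Nodup := by decide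
    have hflat : ((pvWA m).flatMap (fun i => pvAlphabet.map (fun j => i ++ j))).Nodup := by
      rw [List.nodup_flatMap]
      constructor
      · intro i _
        exact halpha.map (fun a b h => List.append_cancel_left h)
      · refine List.Pairwise.imp_of_mem ?_ ih.1
        intro i1 i2 h1 h2 hne
        intro x hx1 hx2
        rw [List.mem_map] at hx1 hx2
        obtain ⟨j1, hj1, e1⟩ := hx1
        obtain ⟨j2, hj2, e2⟩ := hx2
        have l1 : i1.length = m + 1 := ((pv_WA_mem_iff m i1).1 h1).1
        have l2 : i2.length = m + 1 := ((pv_WA_mem_iff m i2).1 h2).1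
        apply hne
        have : i1 ++ j1 = i2 ++ j2 := by rw [e1, e2]
        have := congrArg (List.take (m + 1)) this
        rwa [List.take_left' l1, List.take_left' l2] at this
    rw [pv_WA_succ, pvWStep, PySem.Set.ofList_eq_self_of_nodup _ hflat]
    refine ⟨hflat, ?_⟩
    rw [List.length_flatMap]
    have hmap : (pvWA m).map (fun i => (pvAlphabet.map (fun j => i ++ j)).length)
        = (pvWA m).map (fun _ => 20) := by
      apply List.map_congr_left
      intro i _
      simp [List.length_map]
      decide
    rw [hmap, List.map_const', List.sum_replicate, smul_eq_mul, ih.2]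
    ring

-- membership in an add-if fold (B's window collection)
theorem pv_mem_foldl_if_add (win : Int → List Char) (cond : List Char → Bool)
    (l : List Int) (s : PySem.Set (List Char)) (y : List Char) :
    (y ∈ l.foldl (fun s k => if cond (win k) then PySem.Set.add s (win k) else s) s) ↔
      y ∈ s ∨ ∃ k ∈ l, cond (win k) = true ∧ win k = y := by
  induction l generalizing s with
  | nil => simp
  | cons x t ih =>
    rw [List.foldl_cons]
    cases hx : cond (win x) with
    | false =>
      rw [if_neg (by simp [hx])]
      rw [ih]
      constructor
      · rintro (h | ⟨k, hk, hc, he⟩)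
        · exact Or.inl h
        · exact Or.inr ⟨k, List.mem_cons_of_mem _ hk, hc, he⟩
      · rintro (h | ⟨k, hk, hc, he⟩)
        · exact Or.inl h
        · rcases List.mem_cons.1 hk with rfl | hk'
          · rw [hc] at hx; cases hx
          · exact Or.inr ⟨k, hk', hc, he⟩
    | true =>
      rw [if_pos (by simp [hx])]
      rw [ih]
      rw [PySem.Set.mem_add]
      constructor
      · rintro (⟨h | h⟩ | ⟨k, hk, hc, he⟩)
        · exact Or.inl h
        · exact Or.inr ⟨x, List.mem_cons_self .., hx, h.symm⟩
        · exact Or.inr ⟨k, List.mem_cons_of_mem _ hk, hc, he⟩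
      · rintro (h | ⟨k, hk, hc, he⟩)
        · exact Or.inl (Or.inl h)
        · rcases List.mem_cons.1 hk with rfl | hk'
          · exact Or.inl (Or.inr he.symm)
          · exact Or.inr ⟨k, hk', hc, he⟩

theorem pv_nodup_foldl_if_add (win : Int → List Char) (cond : List Char → Bool)
    (l : List Int) (s : PySem.Set (List Char)) (hs : s.Nodup) :
    (l.foldl (fun s k => if cond (win k) then PySem.Set.add s (win k) else s) s).Nodup := by
  induction l generalizing s with
  | nil => exact hs
  | cons x t ih =>
    rw [List.foldl_cons]
    split
    · exact ih _ (PySem.Set.nodup_add _ _ hs)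
    · exact ih _ hs

theorem pv_mem_windows (cs : List Char) (L : Int) (y : List Char) :
    y ∈ pvWindows cs L ↔
      ∃ k ∈ PySem.List.pyRange 0 ((cs.length : Int) - L + 1) 1,
        (y.all (fun c => pvAlphChars.contains c)) = true ∧
        PySem.List.slice cs (some k) (some (k + L)) = y := by
  rw [pvWindows]
  rw [pv_mem_foldl_if_add (fun k => PySem.List.slice cs (some k) (some (k + L)))
      (fun w => w.all (fun c => pvAlphChars.contains c))]
  constructor
  · rintro (h | ⟨k, hk, hc, he⟩)
    · cases h
    · exact ⟨k, hk, by rw [← he]; exact hc, he⟩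
  · rintro ⟨k, hk, hc, he⟩
    exact Or.inr ⟨k, hk, by rw [he]; exact hc, he⟩

theorem pv_nodup_windows (cs : List Char) (L : Int) : (pvWindows cs L).Nodup := by
  rw [pvWindows]
  exact pv_nodup_foldl_if_add (fun k => PySem.List.slice cs (some k) (some (k + L)))
    (fun w => w.all (fun c => pvAlphChars.contains c))
    (PySem.List.pyRange 0 ((cs.length : Int) - L + 1) 1) PySem.Set.empty List.nodup_nil

theorem pv_win_length (cs : List Char) (L k : Int) (h0 : 0 ≤ k) (hL : 0 ≤ L)
    (h1 : k + L ≤ (cs.length : Int)) :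
    (PySem.List.slice cs (some k) (some (k + L))).length = L.toNat := by
  rw [PySem.List.slice_toNat _ h0 (by omega)]
  simp only [List.length_take, List.length_drop]
  omega

-- Kadane with a never-matching pos returns 0
theorem pv_K_noPos (cs pos neg : List Char) (l : List Int) :
    ∀ me pi ni : Int, me ≤ 0 →
      (∀ k ∈ l, PySem.List.slice cs (some k) (some (k + (pos.length : Int))) ≠ pos) →
      (l.foldl (pvKadaneStep cs pos neg) (0, me, pi, ni)).1 = 0 := by
  induction l with
  | nil => intro _ _ _ _ _; rfl
  | cons x t ih =>
    intro me pi ni hme hno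
    have hx := hno x (List.mem_cons_self ..)
    rw [List.foldl_cons]
    by_cases h2 : PySem.List.slice cs (some x) (some (x + (pos.length : Int))) = neg ∧ ni ≤ x
    · have estep : pvKadaneStep cs pos neg (0, me, pi, ni) x
          = (max 0 (max (me + -1) (-1)), max (me + -1) (-1), pi, x + (pos.length : Int)) := by
        simp only [pvKadaneStep]
        rw [if_neg (fun hcon => hx hcon.1), if_pos h2]
      rw [estep, max_eq_left (by omega : max (me + -1) (-1) ≤ 0)]
      exact ih _ _ _ (by omega) fun k hk => hno k (List.mem_cons_of_mem _ hk)
    · have estep : pvKadaneStep cs pos neg (0, me, pi, ni) x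
          = (max 0 (max (me + 0) 0), max (me + 0) 0, pi, ni) := by
        simp only [pvKadaneStep]
        rw [if_neg (fun hcon => hx hcon.1), if_neg h2]
      rw [estep, max_eq_left (by omega : max (me + 0) 0 ≤ 0)]
      exact ih _ _ _ (by omega) fun k hk => hno k (List.mem_cons_of_mem _ hk)

-- Kadane with a never-matching neg is the gated occurrence count
theorem pv_K_noNeg (cs pos neg : List Char) (l : List Int) :
    ∀ c pi ni : Int, 0 ≤ c →
      (∀ k ∈ l, PySem.List.slice cs (some k) (some (k + (pos.length : Int))) ≠ neg) →
      (l.foldl (pvKadaneStep cs pos neg) (c, c, pi, ni)).1 =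
      (l.foldl (fun (st : Int × Int) k =>
        if PySem.List.slice cs (some k) (some (k + (pos.length : Int))) = pos ∧ st.2 ≤ k then
          (st.1 + 1, k + (pos.length : Int))
        else st) (c, pi)).1 := by
  induction l with
  | nil => intro _ _ _ _ _; rfl
  | cons x t ih =>
    intro c pi ni hc hno
    have hx := hno x (List.mem_cons_self ..)
    rw [List.foldl_cons, List.foldl_cons]
    by_cases h1 : PySem.List.slice cs (some x) (some (x + (pos.length : Int))) = pos ∧ pi ≤ x
    · have estep : pvKadaneStep cs pos neg (c, c, pi, ni) x
          = (max c (max (c + 1) 1), max (c + 1) 1, x + (pos.length : Int), ni) := by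
        simp only [pvKadaneStep]
        rw [if_pos h1]
      have e2 : max c (max (c + 1) 1) = c + 1 := by omega
      have e3 : max (c + 1) 1 = c + 1 := by omega
      rw [estep, e2, e3, if_pos h1]
      exact ih _ _ _ (by omega) fun k hk => hno k (List.mem_cons_of_mem _ hk)
    · have estep : pvKadaneStep cs pos neg (c, c, pi, ni) x
          = (max c (max (c + 0) 0), max (c + 0) 0, pi, ni) := by
        simp only [pvKadaneStep]
        rw [if_neg h1, if_neg (fun hcon => hx hcon.1)]
      have e2 : max c (max (c + 0) 0) = c := by omega
      have e3 : max (c + 0) 0 = c := by omega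
      rw [estep, e2, e3, if_neg h1]
      exact ih _ _ _ hc fun k hk => hno k (List.mem_cons_of_mem _ hk)

-- the tag list B's phase 1 produces
def pvTags (cs pos neg : List Char) : List Int → Int → Int → List Int
  | [], _, _ => []
  | k :: t, pi, ni =>
    if PySem.List.slice cs (some k) (some (k + (pos.length : Int))) = pos ∧ pi ≤ k then
      1 :: pvTags cs pos neg t (k + (pos.length : Int)) ni
    else if PySem.List.slice cs (some k) (some (k + (pos.length : Int))) = neg ∧ ni ≤ k then
      (-1) :: pvTags cs pos neg t pi (k + (pos.length : Int))
    else 0 :: pvTags cs pos neg t pi ni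

theorem pv_tagfold (cs pos neg : List Char) (l : List Int) :
    ∀ (vs : List Int) (pi ni : Int),
      (l.foldl (pvTagStep cs pos neg) (vs, pi, ni)).1 = vs ++ pvTags cs pos neg l pi ni := by
  induction l with
  | nil => intro vs pi ni; simp [pvTags]
  | cons x t ih =>
    intro vs pi ni
    rw [List.foldl_cons, pvTags]
    by_cases h1 : PySem.List.slice cs (some x) (some (x + (pos.length : Int))) = pos ∧ pi ≤ x
    · rw [if_pos h1]
      have : pvTagStep cs pos neg (vs, pi, ni) x
          = (vs ++ [1], x + (pos.length : Int), ni) := by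
        simp only [pvTagStep]
        rw [if_pos h1]
      rw [this, ih]
      simp
    · rw [if_neg h1]
      by_cases h2 : PySem.List.slice cs (some x) (some (x + (pos.length : Int))) = neg ∧ ni ≤ x
      · rw [if_pos h2]
        have : pvTagStep cs pos neg (vs, pi, ni) x
            = (vs ++ [-1], pi, x + (pos.length : Int)) := by
          simp only [pvTagStep]
          rw [if_neg h1, if_pos h2]
        rw [this, ih]
        simp
      · rw [if_neg h2]
        have : pvTagStep cs pos neg (vs, pi, ni) x
            = (vs ++ [0], pi, ni) := by
          simp only [pvTagStep]
          rw [if_neg h1, if_neg h2]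
        rw [this, ih]
        simp

theorem pv_kad_fused (cs pos neg : List Char) (l : List Int) :
    ∀ (res me pi ni : Int),
      (l.foldl (pvKadaneStep cs pos neg) (res, me, pi, ni)).1 =
      ((pvTags cs pos neg l pi ni).foldl pvKad2Step (res, me)).1 := by
  induction l with
  | nil => intro _ _ _ _; rfl
  | cons x t ih =>
    intro res me pi ni
    rw [List.foldl_cons, pvTags]
    by_cases h1 : PySem.List.slice cs (some x) (some (x + (pos.length : Int))) = pos ∧ pi ≤ x
    · rw [if_pos h1]
      have : pvKadaneStep cs pos neg (res, me, pi, ni) x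
          = (max res (max (me + 1) 1), max (me + 1) 1, x + (pos.length : Int), ni) := by
        simp only [pvKadaneStep]
        rw [if_pos h1]
      rw [this, List.foldl_cons, ih]
      rfl
    · rw [if_neg h1]
      by_cases h2 : PySem.List.slice cs (some x) (some (x + (pos.length : Int))) = neg ∧ ni ≤ x
      · rw [if_pos h2]
        have : pvKadaneStep cs pos neg (res, me, pi, ni) x
            = (max res (max (me + -1) (-1)), max (me + -1) (-1), pi, x + (pos.length : Int)) := by
          simp only [pvKadaneStep]
          rw [if_neg h1, if_pos h2]
        rw [this, List.foldl_cons, ih]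
        rfl
      · rw [if_neg h2]
        have : pvKadaneStep cs pos neg (res, me, pi, ni) x
            = (max res (max (me + 0) 0), max (me + 0) 0, pi, ni) := by
          simp only [pvKadaneStep]
          rw [if_neg h1, if_neg h2]
        rw [this, List.foldl_cons, ih]
        rfl

-- B's two-phase pair score IS A's fused Kadane scan
theorem pv_PS_eq_K (cs pos neg : List Char) :
    pvPairScore cs pos neg = Kadane_for_2blocks cs pos neg := by
  rw [pvPairScore, Kadane_for_2blocks, pv_kad_fused, pv_tagfold]
  simp

theorem pv_absentLoop_iff (m : Nat) : ∀ c p : Int, 1 ≤ c → c ≤ p →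
    (pvAbsentLoop m c p = true ↔ p < c * 20 ^ m) := by
  induction m with
  | zero => intro c p h1 h2; simp [pvAbsentLoop]; omega
  | succ m ih =>
    intro c p h1 h2
    rw [pvAbsentLoop]
    by_cases hgt : c * 20 > p
    · have h20 : (1 : Int) ≤ 20 ^ m := one_le_pow₀ (by norm_num)
      rw [if_pos hgt]
      exact iff_of_true rfl (by rw [pow_succ]; nlinarith)
    · rw [if_neg hgt, ih (c * 20) p (by omega) (by omega), pow_succ]
      constructor <;> intro h <;> nlinarith [one_le_pow₀ (a := (20:Int)) (n := m) (by norm_num)]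

theorem pv_foldl_max_le (l : List Int) : ∀ a b : Int, a ≤ b → (∀ v ∈ l, v ≤ b) →
    l.foldl max a ≤ b := by
  induction l with
  | nil => intro a b h _; exact h
  | cons x t ih =>
    intro a b h hv
    exact ih _ _ (max_le h (hv x (List.mem_cons_self ..))) fun v hvm => hv v (List.mem_cons_of_mem _ hvm)

theorem pv_foldl_max_if {α : Type} (c : α → Prop) [DecidablePred c] (h : α → Int)
    (l : List α) : ∀ a : Int,
    l.foldl (fun r j => if c j then max r (h j) else r) a =
      ((l.filter (fun j => decide (c j))).map h).foldl max a := by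
  induction l with
  | nil => intro a; rfl
  | cons x t ih =>
    intro a
    by_cases hx : c x <;> simp [hx, List.filter_cons, ih]

theorem pv_subset_full (P W : List (List Char)) (hP : P.Nodup) (hW : W.Nodup)
    (hsub : ∀ x ∈ P, x ∈ W) (hlen : W.length ≤ P.length) : ∀ x ∈ W, x ∈ P := by
  intro x hx
  have h1 : P.toFinset ⊆ W.toFinset := by
    intro a ha; rw [List.mem_toFinset] at *; exact hsub a ha
  have h2 : P.toFinset = W.toFinset :=
    Finset.eq_of_subset_of_card_le h1
      (by rw [List.toFinset_card_of_nodup hP, List.toFinset_card_of_nodup hW]; exact hlen)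
  have : x ∈ W.toFinset := List.mem_toFinset.2 hx
  rw [← h2, List.mem_toFinset] at this; exact this

theorem pv_exists_missing (P W : List (List Char)) (hP : P.Nodup) (hW : W.Nodup)
    (hsub : ∀ x ∈ P, x ∈ W) (hlen : P.length < W.length) : ∃ r ∈ W, r ∉ P := by
  by_contra hcon
  push_neg at hcon
  have h1 : W.toFinset ⊆ P.toFinset := by
    intro a ha; rw [List.mem_toFinset] at *; exact hcon a ha
  have := Finset.card_le_card h1
  rw [List.toFinset_card_of_nodup hP, List.toFinset_card_of_nodup hW] at this
  omega

-- no window of seq equals a block outside P (for blocks over the alphabet)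
theorem pv_notinP_nomatch (cs : List Char) (L : Int) (w : List Char)
    (hchars : ∀ c ∈ w, c ∈ pvAlphChars) (hnot : w ∉ pvWindows cs L) :
    ∀ k ∈ PySem.List.pyRange 0 ((cs.length : Int) - L + 1) 1,
      PySem.List.slice cs (some k) (some (k + L)) ≠ w := by
  intro k hk heq
  apply hnot
  rw [pv_mem_windows]
  refine ⟨k, hk, ?_, heq⟩
  simp only [List.all_eq_true, List.contains_iff_mem]
  intro c hc
  simpa using hchars c hc


theorem pv_A_eq (seq : String) (bs : Int) :
    discrepancy seq bs =
      ((pvWA (bs - 1).toNat).flatMap (fun i =>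
        (PySem.Set.diff (pvWA (bs - 1).toNat) (PySem.Set.ofList [i])).map
          (fun j => Kadane_for_2blocks seq.toList i j))).foldl max 0 := by
  rw [List.foldl_flatMap]
  simp only [pvWA, discrepancy]
  rw [pv_foldl_const_iterate, PySem.List.length_pyRange_one, sub_zero]
  simp only [List.foldl_map]

theorem pv_nested_true (P : List (List Char)) (g : List Char → Int)
    (f : List Char → List Char → Int) :
    P.foldl (fun res i =>
      P.foldl (fun r j => if j ≠ i then max r (f i j) else r) (max res (g i))) 0 =
    (P.flatMap (fun i => g i :: (P.filter (fun j => decide (j ≠ i))).map (f i))).foldl max 0 := by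
  rw [List.foldl_flatMap]
  congr 1
  funext res i
  rw [pv_foldl_max_if (fun j => j ≠ i) (f i) P (max res (g i)), List.foldl_cons]

theorem pv_nested_false (P : List (List Char)) (f : List Char → List Char → Int) :
    P.foldl (fun res i =>
      P.foldl (fun r j => if j ≠ i then max r (f i j) else r) res) 0 =
    (P.flatMap (fun i => (P.filter (fun j => decide (j ≠ i))).map (f i))).foldl max 0 := by
  rw [List.foldl_flatMap]
  congr 1
  funext res i
  rw [pv_foldl_max_if (fun j => j ≠ i) (f i) P res]

theorem pv_main (cs : List Char) (m : Nat) (L : Int) (hLm : L = (m : Int) + 1) :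
    (pvWindows cs L).foldl (fun res i =>
      (pvWindows cs L).foldl (fun r j => if j ≠ i then max r (pvPairScore cs i j) else r)
        (if pvAbsentLoop L.toNat 1 ((pvWindows cs L).length : Int) then
          max res (pvGatedCount cs i) else res)) 0
    = ((pvWA m).flatMap (fun i =>
        (PySem.Set.diff (pvWA m) (PySem.Set.ofList [i])).map
          (fun j => Kadane_for_2blocks cs i j))).foldl max 0 := by
  obtain ⟨hWnd, hWlen⟩ := pv_WA_nodup_length m
  have hPnd : (pvWindows cs L).Nodup := pv_nodup_windows cs L
  have hLt : L.toNat = m + 1 := by omega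
  have hWlen1 : ∀ i ∈ pvWA m, (i.length : Int) = L := by
    intro i hi
    have := ((pv_WA_mem_iff m i).1 hi).1
    rw [hLm, this]; push_cast; ring
  have hPsubW : ∀ x ∈ pvWindows cs L, x ∈ pvWA m := by
    intro x hx
    obtain ⟨k, hk, hall, he⟩ := (pv_mem_windows cs L x).1 hx
    rw [PySem.List.mem_pyRange_one] at hk
    have hlen : x.length = L.toNat := by
      rw [← he]; exact pv_win_length cs L k hk.1 (by omega) (by omega)
    refine (pv_WA_mem_iff m x).2 ⟨by omega, ?_⟩
    intro c hc
    have := List.all_eq_true.1 hall c hc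
    simpa using this
  have hK0 : ∀ i ∈ pvWA m, i ∉ pvWindows cs L → ∀ j, Kadane_for_2blocks cs i j = 0 := by
    intro i hi hnp j
    have hno : ∀ k ∈ PySem.List.pyRange 0 ((cs.length : Int) - (i.length : Int) + 1) 1,
        PySem.List.slice cs (some k) (some (k + (i.length : Int))) ≠ i := by
      rw [hWlen1 i hi]
      exact pv_notinP_nomatch cs L i (fun c hc => ((pv_WA_mem_iff m i).1 hi).2 c hc) hnp
    exact pv_K_noPos cs i j _ 0 0 0 le_rfl hno
  have hKG : ∀ i ∈ pvWA m, ∀ j ∈ pvWA m, j ∉ pvWindows cs L →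
      Kadane_for_2blocks cs i j = pvGatedCount cs i := by
    intro i hi j hj hnp
    have hno : ∀ k ∈ PySem.List.pyRange 0 ((cs.length : Int) - (i.length : Int) + 1) 1,
        PySem.List.slice cs (some k) (some (k + (i.length : Int))) ≠ j := by
      rw [hWlen1 i hi]
      exact pv_notinP_nomatch cs L j (fun c hc => ((pv_WA_mem_iff m j).1 hj).2 c hc) hnp
    exact pv_K_noNeg cs i j _ 0 0 0 le_rfl hno
  cases habs : pvAbsentLoop L.toNat 1 ((pvWindows cs L).length : Int) with
  | true =>
    simp only [reduceIte]
    rw [pv_nested_true (pvWindows cs L) (pvGatedCount cs) (fun i j => pvPairScore cs i j)]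
    have hmissing : ∃ r ∈ pvWA m, r ∉ pvWindows cs L := by
      by_cases hpe : pvWindows cs L = []
      · have hWne : pvWA m ≠ [] := by
          intro h
          have h20 : 0 < 20 ^ (m + 1) := Nat.pow_pos (by norm_num)
          rw [h] at hWlen
          simp only [List.length_nil] at hWlen
          exact absurd hWlen.symm h20.ne'
        obtain ⟨w, hw⟩ := List.exists_mem_of_ne_nil _ hWne
        exact ⟨w, hw, by simp [hpe]⟩
      · have hp1 : 1 ≤ (pvWindows cs L).length := List.length_pos_iff.2 hpe
        have hlt := (pv_absentLoop_iff L.toNat 1 ((pvWindows cs L).length : Int) le_rfl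
          (by exact_mod_cast hp1)).1 habs
        rw [one_mul, hLt] at hlt
        apply pv_exists_missing _ _ hPnd hWnd hPsubW
        have hWc : ((pvWA m).length : Int) = (20 : Int) ^ (m + 1) := by
          rw [hWlen]; push_cast; ring
        have : ((pvWindows cs L).length : Int) < ((pvWA m).length : Int) := by
          rw [hWc]; exact hlt
        exact_mod_cast this
    apply le_antisymm
    · apply pv_foldl_max_le _ 0 _ (PySem.List.le_foldl_max _ 0).1
      intro v hv
      rw [List.mem_flatMap] at hv
      obtain ⟨i, hiP, hv⟩ := hv
      rcases List.mem_cons.1 hv with rfl | hv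
      · obtain ⟨r, hrW, hrP⟩ := hmissing
        have hne : r ≠ i := fun h => hrP (h ▸ hiP)
        rw [← hKG i (hPsubW i hiP) r hrW hrP]
        apply (PySem.List.le_foldl_max _ 0).2
        rw [List.mem_flatMap]
        refine ⟨i, hPsubW i hiP, List.mem_map.2 ⟨r, ?_, rfl⟩⟩
        rw [PySem.Set.mem_diff]
        refine ⟨hrW, ?_⟩
        simp [PySem.Set.mem_ofList, hne]
      · rw [List.mem_map] at hv
        obtain ⟨j, hjf, rfl⟩ := hv
        have hjP := (List.mem_filter.1 hjf).1
        have hne : j ≠ i := by simpa using (List.mem_filter.1 hjf).2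
        rw [pv_PS_eq_K]
        apply (PySem.List.le_foldl_max _ 0).2
        rw [List.mem_flatMap]
        refine ⟨i, hPsubW i hiP, List.mem_map.2 ⟨j, ?_, rfl⟩⟩
        rw [PySem.Set.mem_diff]
        refine ⟨hPsubW j hjP, ?_⟩
        simp [PySem.Set.mem_ofList, hne]
    · apply pv_foldl_max_le _ 0 _ (PySem.List.le_foldl_max _ 0).1
      intro v hv
      rw [List.mem_flatMap] at hv
      obtain ⟨i, hiW, hv⟩ := hv
      rw [List.mem_map] at hv
      obtain ⟨j, hjd, rfl⟩ := hv
      rw [PySem.Set.mem_diff] at hjd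
      obtain ⟨hjW, hjni⟩ := hjd
      have hne : j ≠ i := by simpa [PySem.Set.mem_ofList] using hjni
      by_cases hiP : i ∈ pvWindows cs L
      · by_cases hjP : j ∈ pvWindows cs L
        · rw [← pv_PS_eq_K]
          apply (PySem.List.le_foldl_max _ 0).2
          rw [List.mem_flatMap]
          exact ⟨i, hiP, List.mem_cons_of_mem _
            (List.mem_map.2 ⟨j, List.mem_filter.2 ⟨hjP, by simp [hne]⟩, rfl⟩)⟩
        · rw [hKG i hiW j hjW hjP]
          apply (PySem.List.le_foldl_max _ 0).2
          rw [List.mem_flatMap]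
          exact ⟨i, hiP, List.mem_cons_self ..⟩
      · rw [hK0 i hiW hiP j]
        exact (PySem.List.le_foldl_max _ 0).1
  | false =>
    simp only [Bool.false_eq_true, if_false]
    rw [pv_nested_false (pvWindows cs L) (fun i j => pvPairScore cs i j)]
    have hPne : pvWindows cs L ≠ [] := by
      intro h
      rw [hLt, h] at habs
      simp only [pvAbsentLoop, List.length_nil] at habs
      norm_num at habs
    have hp1 : 1 ≤ (pvWindows cs L).length := List.length_pos_iff.2 hPne
    have hge : (20 : Int) ^ (m + 1) ≤ ((pvWindows cs L).length : Int) := by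
      by_contra hcon
      push_neg at hcon
      have := (pv_absentLoop_iff L.toNat 1 ((pvWindows cs L).length : Int) le_rfl
        (by exact_mod_cast hp1)).2 (by rw [one_mul, hLt]; exact hcon)
      rw [habs] at this
      cases this
    have hAll : ∀ x ∈ pvWA m, x ∈ pvWindows cs L := by
      apply pv_subset_full _ _ hPnd hWnd hPsubW
      have hWc : ((pvWA m).length : Int) = (20 : Int) ^ (m + 1) := by
        rw [hWlen]; push_cast; ring
      have : ((pvWA m).length : Int) ≤ ((pvWindows cs L).length : Int) := by
        rw [hWc]; exact hge
      exact_mod_cast this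
    apply le_antisymm
    · apply pv_foldl_max_le _ 0 _ (PySem.List.le_foldl_max _ 0).1
      intro v hv
      rw [List.mem_flatMap] at hv
      obtain ⟨i, hiP, hv⟩ := hv
      rw [List.mem_map] at hv
      obtain ⟨j, hjf, rfl⟩ := hv
      have hjP := (List.mem_filter.1 hjf).1
      have hne : j ≠ i := by simpa using (List.mem_filter.1 hjf).2
      rw [pv_PS_eq_K]
      apply (PySem.List.le_foldl_max _ 0).2
      rw [List.mem_flatMap]
      refine ⟨i, hPsubW i hiP, List.mem_map.2 ⟨j, ?_, rfl⟩⟩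
      rw [PySem.Set.mem_diff]
      refine ⟨hPsubW j hjP, ?_⟩
      simp [PySem.Set.mem_ofList, hne]
    · apply pv_foldl_max_le _ 0 _ (PySem.List.le_foldl_max _ 0).1
      intro v hv
      rw [List.mem_flatMap] at hv
      obtain ⟨i, hiW, hv⟩ := hv
      rw [List.mem_map] at hv
      obtain ⟨j, hjd, rfl⟩ := hv
      rw [PySem.Set.mem_diff] at hjd
      obtain ⟨hjW, hjni⟩ := hjd
      have hne : j ≠ i := by simpa [PySem.Set.mem_ofList] using hjni
      rw [← pv_PS_eq_K]
      apply (PySem.List.le_foldl_max _ 0).2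
      rw [List.mem_flatMap]
      exact ⟨i, hAll i hiW,
        List.mem_map.2 ⟨j, List.mem_filter.2 ⟨hAll j hjW, by simp [hne]⟩, rfl⟩⟩


-- ===== VERDICT (by name: the statement is the Claim_ definition above) =====
theorem discrepancy_spec : Claim_equal_discrepancy := by
  unfold Claim_equal_discrepancy Spec_discrepancy
  intro seq bs _dom
  have hLdef : (if 1 < bs then bs else 1) = (((bs - 1).toNat : Int) + 1) := by
    split <;> omega
  rw [pv_A_eq seq bs]
  simp only [discrepancy_alt]
  rw [hLdef]
  exact (pv_main seq.toList ((bs - 1).toNat) _ rfl).symm
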